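-- pv_equiv track=rewrite | github.com/kyupkyup/algorithms | 쇠막대기 스택/쇠막대기 스택/쇠막대기_스택.py | solution
-- ===== SOURCE A (Python) =====
-- def solution(arrangement):
--     stack = []
--     count = 0
--     answer = 0
--     for i in range(len(arrangement)):
--         if arrangement[i] == "(":
--             stack.append(i)
--             count += 1
--             answer += 1
--         elif arrangement[i] == ")":
--             if i - stack[-1] <= 1:
--                 count -= 1
--                 del stack[-1]
--                 answer += len(stack)
--                 answer -= 1
--             else:
--                 count -= 1
--                 del stack[-1]
--     return answer
-- ===== SOURCE B (Python) =====
-- def solution(arrangement):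
--     # stage 1: tokenize, fusing each "()" pair into a laser marker (None)
--     tokens = []
--     i = 0
--     n = len(arrangement)
--     while i < n:
--         if arrangement[i] == "(" and i + 1 < n and arrangement[i + 1] == ")":
--             tokens.append(None)          # a laser
--             i += 2
--         else:
--             tokens.append(arrangement[i])
--             i += 1
--     # stage 2: score with a bare depth counter (no stack)
--     answer = 0
--     depth = 0
--     for t in tokens:
--         if t is None:
--             answer += depth
--         elif t == "(":
--             depth += 1
--             answer += 1
--         elif t == ")":
--             depth -= 1
--     return answer
-- ===== Notes on version B (the rewrite author's own statement) =====
-- stated objective: alternative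
-- what changed: B replaces A's single-pass index-stack (push index per '(', pop per ')' with an index-distance test and preemptive +1/-1 answer corrections, plus a dead count variable) by a stack-free two-stage algorithm: a first pass fuses each adjacent "()" pair into a laser token, a second pass scores the token list with a bare depth counter (laser adds depth, '(' adds 1).
import Mathlib
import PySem

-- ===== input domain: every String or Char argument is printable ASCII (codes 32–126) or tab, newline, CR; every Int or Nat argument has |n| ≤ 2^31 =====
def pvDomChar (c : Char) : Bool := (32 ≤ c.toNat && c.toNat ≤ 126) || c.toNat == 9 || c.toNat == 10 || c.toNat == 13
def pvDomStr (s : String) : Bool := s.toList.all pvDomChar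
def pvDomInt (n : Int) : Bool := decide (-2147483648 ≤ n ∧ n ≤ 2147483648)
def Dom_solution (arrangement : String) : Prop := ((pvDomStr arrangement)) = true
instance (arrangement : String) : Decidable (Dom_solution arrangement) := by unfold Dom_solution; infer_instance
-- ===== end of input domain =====

-- B replaces A's single-pass index stack by a stack-free two-stage algorithm
-- (fuse "()" pairs into laser tokens, then score with a depth counter); same return value.

-- ===== PORT A =====
-- A's for-i-in-range(len) loop as structural recursion on the index over the same state
def solutionGo (arr : List Char) (i : Nat) (stack : List Int) (count : Int) (answer : Int) : Int :=
  if h : i < arr.length then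
    if arr[i] = '(' then
      solutionGo arr (i + 1) ((i : Int) :: stack) (count + 1) (answer + 1)
    else if arr[i] = ')' then
      match stack with
      | [] => answer   -- Python: stack[-1] on an empty stack raises IndexError (excluded by Pre_)
      | t :: rest =>
        if (i : Int) - t ≤ 1 then
          solutionGo arr (i + 1) rest (count - 1) (answer + (rest.length : Int) - 1)
        else
          solutionGo arr (i + 1) rest (count - 1) answer
    else
      solutionGo arr (i + 1) stack count answer
  else answer
termination_by arr.length - i

def solution (arrangement : String) : Int :=
  solutionGo arrangement.toList 0 [] 0 0

-- ===== PORT B =====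
-- Source B stage 1: the while loop fusing each "()" pair into a laser marker (none)
def pvTokenize : List Char → List (Option Char)
  | [] => []
  | [c] => [some c]
  | c :: c2 :: rest =>
    if c = '(' ∧ c2 = ')' then none :: pvTokenize rest
    else some c :: pvTokenize (c2 :: rest)

-- Source B stage 2: the for-t-in-tokens loop over (depth, answer)
def pvScore : List (Option Char) → Int → Int → Int
  | [], _, answer => answer
  | none :: rest, depth, answer => pvScore rest depth (answer + depth)
  | some c :: rest, depth, answer =>
    if c = '(' then pvScore rest (depth + 1) (answer + 1)
    else if c = ')' then pvScore rest (depth - 1) answer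
    else pvScore rest depth answer

def solution_alt (arrangement : String) : Int :=
  pvScore (pvTokenize arrangement.toList) 0 0

-- ===== PRECONDITION & SPEC =====
-- Pre_ excludes exactly the arrangements with an unmatched ')' (some prefix has more ')' than '('),
-- on which A raises IndexError popping an empty stack.
def Pre_solution (arrangement : String) : Prop :=
  ∀ p ∈ arrangement.toList.inits, p.count ')' ≤ p.count '('
instance (arrangement : String) : Decidable (Pre_solution arrangement) := by
  unfold Pre_solution; infer_instance

def pvWitness_solution : String := "()(())"

def Spec_solution (arrangement : String) (out : Int) : Prop := out = solution_alt arrangement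
instance (arrangement : String) (out : Int) : Decidable (Spec_solution arrangement out) := by
  unfold Spec_solution; infer_instance

-- ===== CLAIM (what is proved, stated in full; the proofs are below) =====
def Claim_equal_solution : Prop := ∀ (arrangement : String), Dom_solution arrangement → Pre_solution arrangement → Spec_solution arrangement (solution arrangement)

-- ===== LEMMAS AND PROOFS =====

-- main invariant: A's walk with stack stA over the remaining characters cs = arr.drop i equals
-- B's score of the tokenized cs starting from depth = stA.length and the same answer, given that
-- all stacked indices are < i, an index t with t+1 = i implies cs does not start with ')'
-- (so A's "i - top ≤ 1" laser test agrees with B's "()"-fusion), and cs keeps prefix balance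
-- relative to stA (A never pops an empty stack).
-- unfolding lemma for pvTokenize when no laser is fused at the head
lemma pvTokenize_cons (c : Char) (rest : List Char)
    (h : ¬ (c = '(' ∧ rest.head? = some ')')) :
    pvTokenize (c :: rest) = some c :: pvTokenize rest := by
  cases rest with
  | nil => simp [pvTokenize]
  | cons c2 r =>
    have h' : ¬ (c = '(' ∧ c2 = ')') := by simpa using h
    simp [pvTokenize, h']

lemma pvMain : ∀ (n : Nat) (cs arr : List Char) (i : Nat) (stA : List Int) (cnt ans : Int),
    cs.length ≤ n →
    cs = arr.drop i →
    (∀ t ∈ stA, t < (i : Int)) →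
    (∀ t ∈ stA, t + 1 = (i : Int) → cs.head? ≠ some ')') →
    (∀ p ∈ cs.inits, (p.count ')' : Int) ≤ stA.length + p.count '(') →
    solutionGo arr i stA cnt ans = pvScore (pvTokenize cs) (stA.length : Int) ans := by
  intro n
  induction n with
  | zero =>
    intro cs arr i stA cnt ans hn hdrop _ _ _
    have hcs : cs = [] := List.eq_nil_of_length_eq_zero (Nat.le_zero.mp hn)
    subst hcs
    have hge : arr.length ≤ i := by
      by_contra h; push_neg at h
      have := congrArg List.length hdrop
      simp [List.length_drop] at this; omega
    rw [solutionGo.eq_def]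
    simp [Nat.not_lt.mpr hge, pvTokenize, pvScore]
  | succ n ih =>
    intro cs arr i stA cnt ans hn hdrop hlt hadj hbal
    match cs, hn with
    | [], _ =>
      have hge : arr.length ≤ i := by
        by_contra h; push_neg at h
        have := congrArg List.length hdrop
        simp [List.length_drop] at this; omega
      rw [solutionGo.eq_def]
      simp [Nat.not_lt.mpr hge, pvTokenize, pvScore]
    | c :: rest, hn =>
      have hi : i < arr.length := by
        by_contra h; push_neg at h
        simp [List.drop_eq_nil_of_le h] at hdrop
      have hdr : arr.drop i = arr[i] :: arr.drop (i + 1) := List.drop_eq_getElem_cons hi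
      rw [hdr] at hdrop
      have hc : c = arr[i] := (List.cons_eq_cons.mp hdrop).1
      have hrest : rest = arr.drop (i + 1) := (List.cons_eq_cons.mp hdrop).2
      by_cases h1 : c = '('
      · subst h1
        by_cases hlz : rest.head? = some ')'
        · -- laser: A takes two steps ('(' push at i, then ')' with (i+1) - i = 1 ≤ 1)
          obtain ⟨c2, rest2, rfl⟩ : ∃ c2 rest2, rest = c2 :: rest2 := by
            cases rest with
            | nil => simp at hlz
            | cons a b => exact ⟨a, b, rfl⟩
          have hc2' : c2 = ')' := by simpa using hlz
          subst hc2'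
          · have hi2 : i + 1 < arr.length := by
              by_contra h; push_neg at h
              simp [List.drop_eq_nil_of_le h] at hrest
            have hdr2 : arr.drop (i+1) = arr[i+1] :: arr.drop (i + 2) :=
              List.drop_eq_getElem_cons hi2
            rw [hdr2] at hrest
            have hc2 : (')' : Char) = arr[i+1] := (List.cons_eq_cons.mp hrest).1
            have hrest2 : rest2 = arr.drop (i + 2) := (List.cons_eq_cons.mp hrest).2
            rw [solutionGo.eq_def]
            simp only [dif_pos hi, ← hc, if_pos rfl]
            rw [solutionGo.eq_def]
            simp only [dif_pos hi2, ← hc2]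
            have hne : ¬ ((')' : Char) = '(') := by decide
            simp only [if_neg hne, if_pos rfl]
            have hle : ((i + 1 : Nat) : Int) - (i : Int) ≤ 1 := by push_cast; omega
            simp only [if_pos hle]
            have heq : ans + 1 + (stA.length : Int) - 1 = ans + stA.length := by ring
            rw [heq]
            have hih := ih rest2 arr (i + 2) stA (cnt + 1 - 1) (ans + (stA.length : Int))
              (by simp at hn; omega)
              hrest2
              (by intro t ht; have := hlt t ht; push_cast; omega)
              (by intro t ht h2; have := hlt t ht; push_cast at h2; omega)
              (by intro p hp
                  have := hbal ('(' :: ')' :: p) (by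
                    simp only [List.mem_inits] at hp ⊢
                    exact List.cons_prefix_cons.mpr ⟨rfl, List.cons_prefix_cons.mpr ⟨rfl, hp⟩⟩)
                  simp [List.count_cons] at this ⊢
                  omega)
            rw [hih]
            simp [pvTokenize, pvScore]
        · -- '(' not followed by ')': a plain '(' token
          rw [solutionGo.eq_def]
          simp only [dif_pos hi, ← hc, if_pos rfl]
          have hih := ih rest arr (i + 1) ((i : Int) :: stA) (cnt + 1) (ans + 1)
            (by simp at hn ⊢; omega)
            hrest
            (by intro t ht; simp at ht
                rcases ht with h | h
                · omega
                · have := hlt t h; omega)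
            (by intro t ht h2
                rcases List.mem_cons.mp ht with h | h
                · exact fun hcc => hlz (by rw [hcc])
                · have := hlt t h; push_cast at h2; omega)
            (by intro p hp
                have := hbal ('(' :: p) (by
                  simp only [List.mem_inits] at hp ⊢
                  exact List.cons_prefix_cons.mpr ⟨rfl, hp⟩)
                simp [List.count_cons] at this ⊢
                omega)
          rw [hih, pvTokenize_cons _ _ (by intro h; exact hlz h.2)]
          simp [pvScore]
      · by_cases h2 : c = ')'
        · subst h2
          rw [solutionGo.eq_def]
          simp only [dif_pos hi, ← hc, if_neg h1, if_pos rfl]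
          match stA with
          | [] =>
            have h0 := hbal [')'] (by simp [List.mem_inits])
            simp at h0
          | t :: stR =>
            have ht : t < (i : Int) := hlt t (by simp)
            have hadj' : t + 1 ≠ (i : Int) := by
              intro h
              exact (hadj t (by simp) h) rfl
            have hnle : ¬ ((i : Int) - t ≤ 1) := by omega
            simp only [if_neg hnle]
            have hih := ih rest arr (i + 1) stR (cnt - 1) ans
              (by simp at hn ⊢; omega) hrest
              (by intro u hu; have := hlt u (by simp [hu]); omega)
              (by intro u hu h2'
                  have := hlt u (by simp [hu]); omega)
              (by intro p hp
                  have := hbal (')' :: p) (by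
                    simp only [List.mem_inits] at hp ⊢
                    exact List.cons_prefix_cons.mpr ⟨rfl, hp⟩)
                  simp [List.count_cons] at this ⊢
                  omega)
            rw [hih, pvTokenize_cons _ _ (by intro h; exact absurd h.1 (by decide))]
            simp only [pvScore, if_neg (by decide : ¬ ((')' : Char) = '(')), if_pos rfl]
            simp
        · rw [solutionGo.eq_def]
          simp only [dif_pos hi, ← hc, if_neg h1, if_neg h2]
          have hih := ih rest arr (i + 1) stA cnt ans
            (by simp at hn ⊢; omega) hrest
            (by intro u hu; have := hlt u hu; omega)
            (by intro u hu h2'; have := hlt u hu; omega)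
            (by intro p hp
                have := hbal (c :: p) (by
                  simp only [List.mem_inits] at hp ⊢
                  exact List.cons_prefix_cons.mpr ⟨rfl, hp⟩)
                simp [List.count_cons, h1, h2] at this ⊢
                omega)
          rw [hih, pvTokenize_cons _ _ (by intro h; exact h1 h.1)]
          simp [pvScore, h1, h2]

-- ===== VERDICT (by name: the statement is the Claim_ definition above) =====
theorem solution_spec : Claim_equal_solution := by
  intro s _ hpre
  show solution s = solution_alt s
  have := pvMain s.toList.length s.toList s.toList 0 [] 0 0 le_rfl rfl
    (by intro t ht; simp at ht) (by intro t ht; simp at ht)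
    (by intro p hp; have := hpre p hp; push_cast; omega)
  simpa [solution, solution_alt] using this
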